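-- pv_equiv track=rewrite | github.com/hoakhongmau98/Discord-Bot | Password/deconvert_password.py | cut_lst
-- ===== SOURCE A (Python) =====
-- def cut_lst(lst_a):
-- 	x = 1
-- 	# lst chúa ký tự là số
-- 	lst_new = []
-- 	while x < len(lst_a):
-- 		if x +2 == len(lst_a):
-- 			lst_new.append(lst_a[x])
-- 			lst_new.append(lst_a[x+1])
-- 			break
-- 		elif x + 1 == len(lst_a):
-- 			lst_new.append(lst_a[x])
-- 			break
-- 		else:
-- 			lst_new.append(lst_a[x])
-- 			lst_new.append(lst_a[x+1])
-- 			x = x+3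
-- 	return lst_new
-- ===== SOURCE B (Python) =====
-- def cut_lst(lst_a):
--     return [lst_a[i] for i in range(1, len(lst_a)) if i % 3 != 0]
-- ===== Notes on version B (the rewrite author's own statement) =====
-- stated objective: simpler
-- what changed: Replaces the stride-by-3 while loop with its x+2==n/x+1==n tail guards by a single uniform pass over all indices 1..n-1 keeping those with i % 3 != 0.
import Mathlib
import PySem

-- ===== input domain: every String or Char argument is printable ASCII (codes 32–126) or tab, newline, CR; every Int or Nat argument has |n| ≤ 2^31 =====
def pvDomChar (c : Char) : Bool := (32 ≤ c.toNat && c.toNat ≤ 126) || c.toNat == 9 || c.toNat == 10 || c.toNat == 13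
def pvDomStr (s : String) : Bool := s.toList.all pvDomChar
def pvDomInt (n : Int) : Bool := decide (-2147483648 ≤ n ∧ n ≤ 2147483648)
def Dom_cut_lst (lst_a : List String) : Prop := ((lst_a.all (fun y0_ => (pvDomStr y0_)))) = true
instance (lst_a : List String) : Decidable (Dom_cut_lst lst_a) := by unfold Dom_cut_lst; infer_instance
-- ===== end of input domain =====

-- B replaces A's stride-by-3 loop (with its two tail-case branches) by one uniform
-- modulo-filtered pass over all indices; objective: simpler.

-- ===== PORT A =====
-- the while loop: x is the loop variable; every lst_a[x] access in A has x < len,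
-- so getD (with an unreachable default) is exact here
def cutLoopA (lst_a : List String) (x : Nat) : List String :=
  if _h : x < lst_a.length then
    if x + 2 = lst_a.length then
      [lst_a.getD x "", lst_a.getD (x+1) ""]
    else if x + 1 = lst_a.length then
      [lst_a.getD x ""]
    else
      lst_a.getD x "" :: lst_a.getD (x+1) "" :: cutLoopA lst_a (x+3)
  else []
termination_by lst_a.length - x

def cut_lst (lst_a : List String) : List String := cutLoopA lst_a 1

-- ===== PORT B =====
-- [lst_a[i] for i in range(1, len(lst_a)) if i % 3 != 0]
def cut_lst_alt (lst_a : List String) : List String :=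
  ((List.range' 1 (lst_a.length - 1)).filter (fun i => i % 3 != 0)).map
    (fun i => lst_a.getD i "")

-- ===== PRECONDITION & SPEC =====
def Spec_cut_lst (lst_a : List String) (out : List String) : Prop := out = cut_lst_alt lst_a
instance (lst_a : List String) (out : List String) : Decidable (Spec_cut_lst lst_a out) := by unfold Spec_cut_lst; infer_instance

-- ===== CLAIM (what is proved, stated in full; the proofs are below) =====
def Claim_equal_cut_lst : Prop := ∀ (lst_a : List String), Dom_cut_lst lst_a → Spec_cut_lst lst_a (cut_lst lst_a)

-- ===== LEMMAS AND PROOFS =====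

-- loop invariant: from any x ≡ 1 (mod 3), the loop produces exactly the
-- modulo-filtered tail of the index range
theorem cutLoopA_eq (lst_a : List String) (k x : Nat)
    (hk : lst_a.length - x = k) (hx : x % 3 = 1) :
    cutLoopA lst_a x =
      ((List.range' x (lst_a.length - x)).filter (fun i => i % 3 != 0)).map
        (fun i => lst_a.getD i "") := by
  induction k using Nat.strong_induction_on generalizing x with
  | _ k ih =>
    rw [cutLoopA]
    by_cases h : x < lst_a.length
    · simp only [h, dif_pos]
      by_cases h2 : x + 2 = lst_a.length
      · have : lst_a.length - x = 2 := by omega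
        rw [this]
        have hx1 : x % 3 != 0 := by simp [bne_iff_ne]; omega
        have hx2 : (x+1) % 3 != 0 := by simp [bne_iff_ne]; omega
        simp [List.range', h2, hx1, hx2]
      · by_cases h1 : x + 1 = lst_a.length
        · have : lst_a.length - x = 1 := by omega
          rw [this]
          have hx1 : x % 3 != 0 := by simp [bne_iff_ne]; omega
          simp [List.range', h2, h1, hx1]
        · have h3 : x + 3 ≤ lst_a.length := by omega
          have hsz : lst_a.length - x = 3 + (lst_a.length - (x + 3)) := by omega
          rw [if_neg h2, if_neg h1, hsz]
          have hrng : List.range' x (3 + (lst_a.length - (x + 3))) =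
              x :: (x+1) :: (x+2) :: List.range' (x+3) (lst_a.length - (x+3)) := by
            rw [show 3 + (lst_a.length - (x + 3)) = (lst_a.length - (x+3)) + 1 + 1 + 1 by omega]
            simp [List.range'_succ]
          rw [hrng]
          have hx1 : x % 3 != 0 := by simp [bne_iff_ne]; omega
          have hx2 : (x+1) % 3 != 0 := by simp [bne_iff_ne]; omega
          have hx3 : ((x+2) % 3 != 0) = false := by simp [bne_iff_ne]; omega
          rw [ih (lst_a.length - (x + 3)) (by omega) (x+3) rfl (by omega)]
          simp [List.filter_cons, hx1, hx2, hx3]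
    · have : lst_a.length - x = 0 := by omega
      simp [h, this]

-- ===== VERDICT (by name: the statement is the Claim_ definition above) =====
theorem cut_lst_spec : Claim_equal_cut_lst := by
  intro lst_a _
  unfold Spec_cut_lst cut_lst cut_lst_alt
  exact cutLoopA_eq lst_a (lst_a.length - 1) 1 rfl rfl
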